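-- pv_equiv track=rewrite | github.com/ItsMysterix/Slurpy | backend/carekit.py | _canon_theme
-- ===== SOURCE A (Python) =====
-- from typing import List, Dict, Optional, Sequence, TypedDict
--
-- THEME_ALIAS: Dict[str, str] = {
--     "ongoing_anxiety": "anxiety",
--     "ongoing_depression": "depression",
--     "ongoing_anger": "anger",
--     "ongoing_relationships": "relationships",
--     "ongoing_trauma": "trauma",
--     "work_stress": "anxiety",
--     "self_esteem": "depression",
-- }
--
-- def _canon_theme(themes: Sequence[str]) -> Optional[str]:
--     """
--     Choose a canonical theme from possibly mixed inputs.
--     Priority order matches typical prevalence: anxiety > depression > anger > relationships > trauma.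
--     """
--     if not themes:
--         return None
--     # Normalize and alias
--     norm = []
--     for t in themes:
--         if not t:
--             continue
--         tt = str(t).strip().lower().replace("ongoing_", "")
--         tt = THEME_ALIAS.get(t, tt)
--         norm.append(tt)
--
--     # Priority pick
--     for k in ("anxiety", "depression", "anger", "relationships", "trauma"):
--         if k in norm:
--             return k
--     return None
-- ===== SOURCE B (Python) =====
-- from typing import Dict, Optional, Sequence
--
-- THEME_ALIAS: Dict[str, str] = {
--     "ongoing_anxiety": "anxiety",
--     "ongoing_depression": "depression",
--     "ongoing_anger": "anger",
--     "ongoing_relationships": "relationships",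
--     "ongoing_trauma": "trauma",
--     "work_stress": "anxiety",
--     "self_esteem": "depression",
-- }
--
-- _PRIORITY: Dict[str, int] = {
--     "anxiety": 0,
--     "depression": 1,
--     "anger": 2,
--     "relationships": 3,
--     "trauma": 4,
-- }
-- _NAMES = ("anxiety", "depression", "anger", "relationships", "trauma")
--
--
-- def _canon_theme(themes: Sequence[str]) -> Optional[str]:
--     best = None
--     for t in themes:
--         if not t:
--             continue
--         tt = str(t).strip().lower().replace("ongoing_", "")
--         tt = THEME_ALIAS.get(t, tt)
--         r = _PRIORITY.get(tt)
--         if r is not None and (best is None or r < best):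
--             best = r
--     return None if best is None else _NAMES[best]
-- ===== Notes on version B (the rewrite author's own statement) =====
-- stated objective: simpler
-- what changed: Replaces A's two-phase build-a-normalized-list-then-scan-the-priority-tuple with a single pass that tracks the minimum priority rank seen and maps it back to its canonical name at the end.
import Mathlib
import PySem

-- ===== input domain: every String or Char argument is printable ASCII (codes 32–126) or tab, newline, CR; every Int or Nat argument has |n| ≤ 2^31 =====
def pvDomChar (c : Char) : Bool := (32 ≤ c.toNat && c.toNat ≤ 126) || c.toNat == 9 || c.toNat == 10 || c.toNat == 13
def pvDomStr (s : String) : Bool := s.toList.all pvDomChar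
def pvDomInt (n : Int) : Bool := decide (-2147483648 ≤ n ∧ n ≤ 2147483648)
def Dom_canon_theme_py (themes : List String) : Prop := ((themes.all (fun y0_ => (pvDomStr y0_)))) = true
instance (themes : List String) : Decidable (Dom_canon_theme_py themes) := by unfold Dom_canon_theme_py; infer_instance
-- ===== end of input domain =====

-- B replaces A's normalized-list-then-priority-scan with one pass tracking the minimum priority rank ("simpler").

-- ===== PORT A =====
def themeAlias : PySem.Dict String String := PySem.Dict.ofList
  [("ongoing_anxiety", "anxiety"), ("ongoing_depression", "depression"),
   ("ongoing_anger", "anger"), ("ongoing_relationships", "relationships"),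
   ("ongoing_trauma", "trauma"), ("work_stress", "anxiety"), ("self_esteem", "depression")]

-- shared helper: tt = str(t).strip().lower().replace("ongoing_",""); tt = THEME_ALIAS.get(t, tt)
def canonNorm1 (t : String) : String :=
  let tt := PySem.Str.replace (PySem.Str.lower (PySem.Str.strip t)) "ongoing_" ""
  PySem.Dict.getD themeAlias t tt

def canon_theme_py (themes : List String) : Option String :=
  if themes = [] then none
  else
    let norm := themes.foldl (fun acc t => if t = "" then acc else acc ++ [canonNorm1 t]) []
    if norm.contains "anxiety" then some "anxiety"
    else if norm.contains "depression" then some "depression"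
    else if norm.contains "anger" then some "anger"
    else if norm.contains "relationships" then some "relationships"
    else if norm.contains "trauma" then some "trauma"
    else none

-- ===== PORT B =====
-- _PRIORITY.get(tt)
def canonRank (tt : String) : Option Nat :=
  if tt = "anxiety" then some 0
  else if tt = "depression" then some 1
  else if tt = "anger" then some 2
  else if tt = "relationships" then some 3
  else if tt = "trauma" then some 4
  else none

-- _NAMES[r] (r is always 0..4 here)
def canonName (r : Nat) : String :=
  if r = 0 then "anxiety"
  else if r = 1 then "depression"
  else if r = 2 then "anger"
  else if r = 3 then "relationships"
  else "trauma"

def canon_theme_py_alt (themes : List String) : Option String :=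
  let best := themes.foldl (fun best t =>
    if t = "" then best
    else
      match canonRank (canonNorm1 t) with
      | none => best
      | some r =>
        match best with
        | none => some r
        | some b => if r < b then some r else best) none
  match best with
  | none => none
  | some r => some (canonName r)

-- ===== PRECONDITION & SPEC =====
def Spec_canon_theme_py (themes : List String) (out : Option String) : Prop := out = canon_theme_py_alt themes
instance (themes : List String) (out : Option String) : Decidable (Spec_canon_theme_py themes out) := by unfold Spec_canon_theme_py; infer_instance

-- ===== CLAIM (what is proved, stated in full; the proofs are below) =====
def Claim_equal_canon_theme_py : Prop := ∀ (themes : List String), Dom_canon_theme_py themes → Spec_canon_theme_py themes (canon_theme_py themes)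

-- ===== LEMMAS AND PROOFS =====

-- min-accumulator step, as in B's fold
def minStep (b : Option Nat) (r : Nat) : Option Nat :=
  match b with
  | none => some r
  | some x => if r < x then some r else b

-- A's norm list
def normList (themes : List String) : List String :=
  themes.filterMap (fun t => if t = "" then none else some (canonNorm1 t))

lemma foldl_norm_eq (themes : List String) (acc : List String) :
    themes.foldl (fun acc t => if t = "" then acc else acc ++ [canonNorm1 t]) acc
      = acc ++ normList themes := by
  induction themes generalizing acc with
  | nil => simp [normList]
  | cons t ts ih =>
    simp only [List.foldl_cons, normList, List.filterMap_cons]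
    by_cases h : t = "" <;> simp [h, ih, normList]

lemma foldl_best_eq (themes : List String) (b : Option Nat) :
    themes.foldl (fun best t =>
      if t = "" then best
      else
        match canonRank (canonNorm1 t) with
        | none => best
        | some r =>
          match best with
          | none => some r
          | some x => if r < x then some r else best) b
    = ((normList themes).filterMap canonRank).foldl minStep b := by
  induction themes generalizing b with
  | nil => simp [normList]
  | cons t ts ih =>
    simp only [List.foldl_cons, normList, List.filterMap_cons]
    by_cases h : t = ""
    · simp [h, ih, normList]
    · simp only [h, if_false]
      cases hr : canonRank (canonNorm1 t) with
      | none => simp [hr, ih, normList]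
      | some r => simp [hr, ih, normList, minStep, List.foldl_cons]

lemma canonRank_eq_some (x : String) (r : Nat) (h : canonRank x = some r) :
    x = canonName r ∧ r < 5 := by
  unfold canonRank at h
  split_ifs at h with h1 h2 h3 h4 h5 <;> injection h with h <;> subst h <;>
    first
      | exact ⟨h1, by omega⟩
      | exact ⟨h2, by omega⟩
      | exact ⟨h3, by omega⟩
      | exact ⟨h4, by omega⟩
      | exact ⟨h5, by omega⟩

lemma canonRank_canonName (r : Nat) (h : r < 5) : canonRank (canonName r) = some r := by
  interval_cases r <;> rfl

lemma mem_rank_iff (norm : List String) (r : Nat) (h : r < 5) :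
    r ∈ norm.filterMap canonRank ↔ canonName r ∈ norm := by
  constructor
  · intro hm
    rcases List.mem_filterMap.mp hm with ⟨x, hx, hrx⟩
    rcases canonRank_eq_some x r hrx with ⟨rfl, _⟩
    exact hx
  · intro hm
    exact List.mem_filterMap.mpr ⟨_, hm, canonRank_canonName r h⟩

lemma foldl_minStep_spec (l : List Nat) (b : Option Nat) (m : Nat)
    (h : l.foldl minStep b = some m) :
    (m ∈ l ∨ b = some m) ∧ (∀ r ∈ l, m ≤ r) ∧ (∀ x, b = some x → m ≤ x) := by
  induction l generalizing b with
  | nil =>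
    simp only [List.foldl_nil] at h
    refine ⟨Or.inr h, by simp, fun x hx => ?_⟩
    rw [h] at hx; injection hx with hx; omega
  | cons r ts ih =>
    simp only [List.foldl_cons] at h
    cases b with
    | none =>
      rcases ih (some r) (by simpa [minStep] using h) with ⟨h1, h2, h3⟩
      have hmr : m ≤ r := h3 r rfl
      refine ⟨Or.inl ?_, ?_, ?_⟩
      · rcases h1 with h1 | h1
        · exact List.mem_cons_of_mem _ h1
        · injection h1 with h1; subst h1; exact List.mem_cons_self
      · intro y hy
        rcases List.mem_cons.mp hy with rfl | hy
        · exact hmr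
        · exact h2 y hy
      · intro x hx; exact absurd hx (by simp)
    | some x =>
      by_cases hrx : r < x
      · rcases ih (some r) (by simpa [minStep, hrx] using h) with ⟨h1, h2, h3⟩
        have hmr : m ≤ r := h3 r rfl
        refine ⟨Or.inl ?_, ?_, fun y hy => ?_⟩
        · rcases h1 with h1 | h1
          · exact List.mem_cons_of_mem _ h1
          · injection h1 with h1; subst h1; exact List.mem_cons_self
        · intro y hy
          rcases List.mem_cons.mp hy with rfl | hy
          · exact hmr
          · exact h2 y hy
        · injection hy with hy; subst hy; omega
      · rcases ih (some x) (by simpa [minStep, hrx] using h) with ⟨h1, h2, h3⟩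
        have hmx : m ≤ x := h3 x rfl
        refine ⟨?_, ?_, fun y hy => ?_⟩
        · rcases h1 with h1 | h1
          · exact Or.inl (List.mem_cons_of_mem _ h1)
          · exact Or.inr h1
        · intro y hy
          rcases List.mem_cons.mp hy with rfl | hy
          · omega
          · exact h2 y hy
        · injection hy with hy; subst hy; omega

lemma foldl_minStep_none (l : List Nat) (b : Option Nat)
    (h : l.foldl minStep b = none) : b = none ∧ l = [] := by
  induction l generalizing b with
  | nil => exact ⟨h, rfl⟩
  | cons r ts ih =>
    simp only [List.foldl_cons] at h
    rcases ih _ h with ⟨h1, _⟩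
    cases b with
    | none => simp [minStep] at h1
    | some x => simp only [minStep] at h1; split at h1 <;> simp_all

lemma ranks_lt_five (norm : List String) (r : Nat) (h : r ∈ norm.filterMap canonRank) : r < 5 := by
  rcases List.mem_filterMap.mp h with ⟨x, _, hrx⟩
  exact (canonRank_eq_some x r hrx).2

-- ===== VERDICT (by name: the statement is the Claim_ definition above) =====
theorem canon_theme_py_spec : Claim_equal_canon_theme_py := by
  intro themes _
  unfold Spec_canon_theme_py canon_theme_py canon_theme_py_alt
  rw [foldl_best_eq, foldl_norm_eq]
  simp only [List.nil_append]
  have hmem : ∀ r : Nat, r < 5 →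
      (r ∈ (normList themes).filterMap canonRank ↔ canonName r ∈ normList themes) :=
    fun r h => mem_rank_iff (normList themes) r h
  cases hfold : ((normList themes).filterMap canonRank).foldl minStep none with
  | none =>
    rcases foldl_minStep_none _ none hfold with ⟨_, hRnil⟩
    have hnone : ∀ r : Nat, r < 5 → canonName r ∉ normList themes := by
      intro r hr hmn
      have : r ∈ (normList themes).filterMap canonRank := (hmem r hr).mpr hmn
      rw [hRnil] at this; simp at this
    have h0 : "anxiety" ∉ normList themes := hnone 0 (by omega)
    have h1 : "depression" ∉ normList themes := hnone 1 (by omega)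
    have h2 : "anger" ∉ normList themes := hnone 2 (by omega)
    have h3 : "relationships" ∉ normList themes := hnone 3 (by omega)
    have h4 : "trauma" ∉ normList themes := hnone 4 (by omega)
    split
    · rfl
    · simp [h0, h1, h2, h3, h4]
  | some m =>
    rcases foldl_minStep_spec _ none m hfold with ⟨hin, hmin, -⟩
    have hmR : m ∈ (normList themes).filterMap canonRank := by
      rcases hin with h | h
      · exact h
      · exact absurd h (by simp)
    have hm5 : m < 5 := ranks_lt_five (normList themes) m hmR
    have hmn : canonName m ∈ normList themes := (hmem m hm5).mp hmR
    have hbelow : ∀ r : Nat, r < m → canonName r ∉ normList themes := by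
      intro r hr hmn'
      have : r ∈ (normList themes).filterMap canonRank := (hmem r (by omega)).mpr hmn'
      have := hmin r this; omega
    have hthemes : ¬ themes = [] := by
      intro h; subst h; simp [normList] at hmR
    rw [if_neg hthemes]
    interval_cases m
    · have g0 : "anxiety" ∈ normList themes := hmn
      simp [g0]; rfl
    · have g1 : "depression" ∈ normList themes := hmn
      have b0 : "anxiety" ∉ normList themes := hbelow 0 (by omega)
      simp [g1, b0]; rfl
    · have g2 : "anger" ∈ normList themes := hmn
      have b0 : "anxiety" ∉ normList themes := hbelow 0 (by omega)
      have b1 : "depression" ∉ normList themes := hbelow 1 (by omega)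
      simp [g2, b0, b1]; rfl
    · have g3 : "relationships" ∈ normList themes := hmn
      have b0 : "anxiety" ∉ normList themes := hbelow 0 (by omega)
      have b1 : "depression" ∉ normList themes := hbelow 1 (by omega)
      have b2 : "anger" ∉ normList themes := hbelow 2 (by omega)
      simp [g3, b0, b1, b2]; rfl
    · have g4 : "trauma" ∈ normList themes := hmn
      have b0 : "anxiety" ∉ normList themes := hbelow 0 (by omega)
      have b1 : "depression" ∉ normList themes := hbelow 1 (by omega)
      have b2 : "anger" ∉ normList themes := hbelow 2 (by omega)
      have b3 : "relationships" ∉ normList themes := hbelow 3 (by omega)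
      simp [g4, b0, b1, b2, b3]; rfl
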